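-- pv_equiv track=rewrite | github.com/heerdyes/imsynth | imsynth.py | readtillspace
-- ===== SOURCE A (Python) =====
-- def readtillspace(ln):
--     cmd=[]
--     args=''
--     if ln.startswith(' '):
--         raise Exception('must begin with non-space character')
--     for c in ln:
--         if c==' ':
--             break
--         cmd.append(c)
--     if len(cmd)<len(ln):
--         args=ln[len(cmd)+1:]
--     return ''.join(cmd),args
-- ===== SOURCE B (Python) =====
-- def readtillspace(ln):
--     if ln.startswith(' '):
--         raise Exception('must begin with non-space character')
--     cmd, _, args = ln.partition(' ')
--     return cmd, args
-- ===== Notes on version B (the rewrite author's own statement) =====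
-- stated objective: simpler
-- what changed: Replaces the char-accumulation loop with break plus index arithmetic on len(cmd) by a single str.partition(' ') that yields both halves directly.
import Mathlib
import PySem

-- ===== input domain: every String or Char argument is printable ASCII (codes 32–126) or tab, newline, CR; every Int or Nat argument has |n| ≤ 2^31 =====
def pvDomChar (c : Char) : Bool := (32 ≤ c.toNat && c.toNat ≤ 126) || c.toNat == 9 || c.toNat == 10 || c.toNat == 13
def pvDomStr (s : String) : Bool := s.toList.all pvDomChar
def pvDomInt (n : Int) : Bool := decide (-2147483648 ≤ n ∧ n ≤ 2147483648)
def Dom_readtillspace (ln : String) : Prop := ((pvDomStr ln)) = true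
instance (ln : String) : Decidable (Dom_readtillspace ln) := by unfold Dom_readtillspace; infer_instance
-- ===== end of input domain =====

-- B replaces A's char-accumulation loop + index arithmetic by a single str.partition(' '); objective: simpler.
-- Both programs raise on a leading space (excluded by Pre_).

-- ===== PORT A =====
-- A's for-loop with break: collect chars until the first space (cmd.append(c) / break).
def pvCmdLoopA : List Char → List Char
  | [] => []
  | c :: rest => if c = ' ' then [] else c :: pvCmdLoopA rest

def readtillspace (ln : String) : String × String :=
  let cs := ln.toList
  let cmd := pvCmdLoopA cs
  -- args = ln[len(cmd)+1:] (nonnegative index, so List.drop is exact here)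
  let args := if cmd.length < cs.length then cs.drop (cmd.length + 1) else []
  (String.mk cmd, String.mk args)

-- ===== PORT B =====
-- ln.partition(' '): hand port of the library call, returning (head, tail-after-first-space).
def pvPartitionSp : List Char → List Char × List Char
  | [] => ([], [])
  | c :: rest =>
    if c = ' ' then ([], rest)
    else
      let p := pvPartitionSp rest
      (c :: p.1, p.2)

def readtillspace_alt (ln : String) : String × String :=
  let p := pvPartitionSp ln.toList
  (String.mk p.1, String.mk p.2)

-- ===== PRECONDITION & SPEC =====
-- Pre_ excludes strings beginning with ' ', on which Python A (and B) raise Exception.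
def Pre_readtillspace (ln : String) : Prop := ¬ (ln.toList.head? = some ' ')
instance (ln : String) : Decidable (Pre_readtillspace ln) := by unfold Pre_readtillspace; infer_instance
def pvWitness_readtillspace : String := "go north"

def Spec_readtillspace (ln : String) (out : String × String) : Prop := out = readtillspace_alt ln
instance (ln : String) (out : String × String) : Decidable (Spec_readtillspace ln out) := by unfold Spec_readtillspace; infer_instance

-- ===== CLAIM (what is proved, stated in full; the proofs are below) =====
def Claim_equal_readtillspace : Prop := ∀ (ln : String), Dom_readtillspace ln → Pre_readtillspace ln → Spec_readtillspace ln (readtillspace ln)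

-- ===== LEMMAS AND PROOFS =====
theorem pvLoop_eq_partition (cs : List Char) :
    pvCmdLoopA cs = (pvPartitionSp cs).1 ∧
    (if (pvCmdLoopA cs).length < cs.length then cs.drop ((pvCmdLoopA cs).length + 1) else []) = (pvPartitionSp cs).2 := by
  induction cs with
  | nil => simp [pvCmdLoopA, pvPartitionSp]
  | cons c rest ih =>
    by_cases h : c = ' '
    · simp [pvCmdLoopA, pvPartitionSp, h]
    · obtain ⟨ih1, ih2⟩ := ih
      constructor
      · simp [pvCmdLoopA, pvPartitionSp, h, ih1]
      · simp only [pvCmdLoopA, pvPartitionSp, if_neg h, List.length_cons]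
        rw [← ih2]
        by_cases hl : (pvCmdLoopA rest).length < rest.length
        · simp [hl, List.drop_succ_cons]
        · simp [hl]

-- ===== VERDICT (by name: the statement is the Claim_ definition above) =====
theorem readtillspace_spec : Claim_equal_readtillspace := by
  intro ln _ _
  unfold Spec_readtillspace readtillspace readtillspace_alt
  obtain ⟨h1, h2⟩ := pvLoop_eq_partition ln.toList
  rw [h1] at h2
  simp only [h1, h2]
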